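-- pv_equiv track=rewrite | github.com/AKGIIITH/IRE_Assignment | self_indexer.py | _check_phrase_match
-- ===== SOURCE A (Python) =====
-- from typing import Dict, List, Set, Tuple
--
-- def _check_phrase_match(term_positions: List[List[int]]) -> bool:
--     """
--     Check if terms appear as a consecutive phrase.
--
--     Args:
--         term_positions (List[List[int]]): Positions for each term
--
--     Returns:
--         bool: True if phrase match found
--     """
--     if not term_positions:
--         return False
--
--     # Check all combinations of positions
--     for pos1 in term_positions[0]:
--         current_pos = pos1
--         match = True
--
--         for i in range(1, len(term_positions)):
--             expected_pos = current_pos + 1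
--             if expected_pos not in term_positions[i]:
--                 match = False
--                 break
--             current_pos = expected_pos
--
--         if match:
--             return True
--
--     return False
-- ===== SOURCE B (Python) =====
-- def _check_phrase_match(term_positions):
--     if not term_positions:
--         return False
--     starts = set(term_positions[0])
--     for i, positions in enumerate(term_positions[1:], 1):
--         starts &= {p - i for p in positions}
--     return bool(starts)
-- ===== Notes on version B (the rewrite author's own statement) =====
-- stated objective: alternative
-- what changed: Replaced the per-start forward scan (for each position of the first term, walk the later lists with repeated membership tests) by a single shift-and-intersect pass: each term's positions are normalized to implied phrase starts and intersected, returning whether the intersection is non-empty.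
import Mathlib
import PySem

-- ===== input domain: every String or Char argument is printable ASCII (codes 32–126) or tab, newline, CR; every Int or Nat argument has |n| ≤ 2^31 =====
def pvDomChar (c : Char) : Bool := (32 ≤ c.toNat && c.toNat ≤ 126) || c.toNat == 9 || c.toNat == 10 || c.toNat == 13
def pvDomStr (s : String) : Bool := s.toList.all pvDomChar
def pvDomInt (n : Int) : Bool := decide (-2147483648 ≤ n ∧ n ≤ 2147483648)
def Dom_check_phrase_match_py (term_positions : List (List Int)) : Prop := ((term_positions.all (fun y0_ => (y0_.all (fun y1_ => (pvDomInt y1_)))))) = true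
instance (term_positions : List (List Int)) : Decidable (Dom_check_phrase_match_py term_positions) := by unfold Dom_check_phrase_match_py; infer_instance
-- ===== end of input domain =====

-- B replaces A's per-start forward walk by one shift-and-intersect pass over the term lists (alternative: set intersection of normalized start positions instead of a scan per candidate start).

-- ===== PORT A =====
-- inner 'for i in range(1, len(term_positions))' loop with its break, carrying current_pos
def aWalk (tp : List (List Int)) : Int → List Int → Bool
  | _, [] => true
  | cur, i :: rest =>
      let expected := cur + 1
      if (PySem.List.pyGetD tp i []).contains expected then aWalk tp expected rest else false

def check_phrase_match_py (term_positions : List (List Int)) : Bool :=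
  if term_positions.isEmpty then false
  else
    -- indices 0 and i are always in range here, so pyGetD is exact
    (PySem.List.pyGetD term_positions 0 []).any
      (fun pos1 => aWalk term_positions pos1 (PySem.List.pyRange 1 term_positions.length 1))

-- ===== PORT B =====
def check_phrase_match_py_alt (term_positions : List (List Int)) : Bool :=
  match term_positions with
  | [] => false
  | first :: rest =>
      let starts :=
        (PySem.List.enumerate rest 1).foldl
          (fun (st : PySem.Set Int) ip =>
            PySem.Set.inter st (PySem.Set.ofList (ip.2.map (fun p => p - ip.1))))
          (PySem.Set.ofList first)
      !starts.isEmpty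

-- ===== PRECONDITION & SPEC =====
def Spec_check_phrase_match_py (term_positions : List (List Int)) (out : Bool) : Prop := out = check_phrase_match_py_alt term_positions
instance (term_positions : List (List Int)) (out : Bool) : Decidable (Spec_check_phrase_match_py term_positions out) := by unfold Spec_check_phrase_match_py; infer_instance

-- ===== CLAIM (what is proved, stated in full; the proofs are below) =====
def Claim_equal_check_phrase_match_py : Prop := ∀ (term_positions : List (List Int)), Dom_check_phrase_match_py term_positions → Spec_check_phrase_match_py term_positions (check_phrase_match_py term_positions)

-- ===== LEMMAS AND PROOFS =====

-- common characterisation: x is a phrase start for the lists of `rest`, offset j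
def okFrom (x : Int) : Int → List (List Int) → Bool
  | _, [] => true
  | j, ps :: r => ps.contains (x + j) && okFrom x (j + 1) r

theorem aWalk_eq_okFrom (first : List Int) (rest : List (List Int)) (x : Int) :
    ∀ (k : Nat) (cur j : Int), x + j = cur + 1 → k + 1 ≤ rest.length + 1 →
      aWalk (first :: rest) cur (PySem.List.pyRange (k + 1) (first :: rest).length 1) =
      okFrom x j (rest.drop k) := by
  intro k
  induction hd : rest.length - k generalizing k with
  | zero =>
    intro cur j hxj hk
    have hk' : rest.length ≤ k := by omega
    rw [List.drop_eq_nil_of_le hk']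
    rw [PySem.List.pyRange_one_eq_nil (by simp; omega)]
    rfl
  | succ n ih =>
    intro cur j hxj hk
    have hklt : k < rest.length := by omega
    rw [PySem.List.pyRange_one_cons (by simp; omega)]
    have hdrop : rest.drop k = rest[k] :: rest.drop (k + 1) :=
      (List.drop_eq_getElem_cons hklt)
    rw [hdrop]
    show (if ((PySem.List.pyGetD (first :: rest) ((k : Int) + 1) []).contains (cur + 1))
          then aWalk (first :: rest) (cur + 1) (PySem.List.pyRange ((k : Int) + 1 + 1) (first :: rest).length 1)
          else false)
        = (rest[k].contains (x + j) && okFrom x (j + 1) (rest.drop (k + 1)))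
    have hidx : PySem.List.pyGetD (first :: rest) ((k : Int) + 1) [] = rest[k] := by
      have : ((k : Int) + 1) = ((k + 1 : Nat) : Int) := by push_cast; ring
      rw [this, PySem.List.pyGetD_natCast]
      simp [List.getD, hklt]
    rw [hidx, hxj]
    have harec : aWalk (first :: rest) (cur + 1)
        (PySem.List.pyRange ((k : Int) + 1 + 1) (first :: rest).length 1)
        = okFrom x (j + 1) (rest.drop (k + 1)) := by
      have h2 : ((k : Int) + 1 + 1) = (((k + 1 : Nat) : Int) + 1) := by push_cast; ring
      rw [h2]
      exact ih (k + 1) (by omega) (cur + 1) (j + 1) (by omega) (by omega)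
    cases hc : rest[k].contains (cur + 1) with
    | false => simp
    | true => simpa [hc] using harec

theorem mem_bfold (rest : List (List Int)) (x : Int) :
    ∀ (j : Int) (s : PySem.Set Int),
      (x ∈ (PySem.List.enumerate rest j).foldl
          (fun (st : PySem.Set Int) ip =>
            PySem.Set.inter st (PySem.Set.ofList (ip.2.map (fun p => p - ip.1)))) s)
        ↔ x ∈ s ∧ okFrom x j rest = true := by
  induction rest with
  | nil => intro j s; simp [PySem.List.enumerate_nil, okFrom]
  | cons ps r ih =>
    intro j s
    rw [PySem.List.enumerate_cons, List.foldl_cons, ih]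
    simp only [PySem.Set.mem_inter, PySem.Set.mem_ofList, List.mem_map, okFrom,
      Bool.and_eq_true]
    constructor
    · rintro ⟨⟨hs, p, hp, hpe⟩, hok⟩
      refine ⟨hs, ?_, hok⟩
      simp only [List.contains_iff_mem]
      have : p = x + j := by omega
      rwa [← this]
    · rintro ⟨hs, hc, hok⟩
      simp only [List.contains_iff_mem] at hc
      exact ⟨⟨hs, x + j, hc, by ring⟩, hok⟩

-- ===== VERDICT (by name: the statement is the Claim_ definition above) =====
theorem check_phrase_match_py_spec : Claim_equal_check_phrase_match_py := by
  intro tp _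
  unfold Spec_check_phrase_match_py
  match tp with
  | [] => rfl
  | first :: rest =>
    show check_phrase_match_py (first :: rest) = check_phrase_match_py_alt (first :: rest)
    unfold check_phrase_match_py check_phrase_match_py_alt
    simp only [List.isEmpty_cons, if_false, PySem.List.pyGetD_zero_cons, Bool.false_eq_true]
    have hA : ∀ p : Int,
        aWalk (first :: rest) p (PySem.List.pyRange 1 (first :: rest).length 1)
          = okFrom p 1 rest := by
      intro p
      have := aWalk_eq_okFrom first rest p 0 p 1 (by ring) (by omega)
      simpa using this
    rw [Bool.eq_iff_iff]
    simp only [List.any_eq_true, hA, Bool.not_eq_true', List.isEmpty_eq_false_iff]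
    constructor
    · rintro ⟨p, hp, hok⟩ hnil
      have hm := (mem_bfold rest p 1 (PySem.Set.ofList first)).mpr
        ⟨(PySem.Set.mem_ofList _ _).mpr hp, hok⟩
      rw [hnil] at hm
      exact absurd hm (List.not_mem_nil)
    · intro hne
      obtain ⟨p, hp⟩ := List.exists_mem_of_ne_nil _ hne
      obtain ⟨hs, hok⟩ := (mem_bfold rest p 1 (PySem.Set.ofList first)).mp hp
      exact ⟨p, (PySem.Set.mem_ofList _ _).mp hs, hok⟩
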